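-- pv_equiv track=rewrite | github.com/RohiniReddy03/flames | flames.py | remove_common_letters
-- ===== SOURCE A (Python) =====
-- def remove_common_letters(name1, name2):
--     name1_list = list(name1)
--     name2_list = list(name2)
--
--     for char in name1[:]:  # copy of name1
--         if char in name2_list:
--             name1_list.remove(char)
--             name2_list.remove(char)
--
--     total_count = len(name1_list) + len(name2_list)
--     return total_count
-- ===== SOURCE B (Python) =====
-- def remove_common_letters(name1, name2):
--     s1 = sorted(name1)
--     s2 = sorted(name2)
--     i = j = matched = 0
--     while i < len(s1) and j < len(s2):
--         if s1[i] == s2[j]: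
--             matched += 1
--             i += 1
--             j += 1
--         elif s1[i] < s2[j]:
--             i += 1
--         else:
--             j += 1
--     return len(name1) + len(name2) - 2 * matched
-- ===== Notes on version B (the rewrite author's own statement) =====
-- stated objective: faster
-- what changed: Replaces the repeated membership-test-and-remove scans over both character lists with sorting both names once and counting the multiset intersection in a single two-pointer merge pass, returning len1+len2-2*matched.
import Mathlib
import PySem

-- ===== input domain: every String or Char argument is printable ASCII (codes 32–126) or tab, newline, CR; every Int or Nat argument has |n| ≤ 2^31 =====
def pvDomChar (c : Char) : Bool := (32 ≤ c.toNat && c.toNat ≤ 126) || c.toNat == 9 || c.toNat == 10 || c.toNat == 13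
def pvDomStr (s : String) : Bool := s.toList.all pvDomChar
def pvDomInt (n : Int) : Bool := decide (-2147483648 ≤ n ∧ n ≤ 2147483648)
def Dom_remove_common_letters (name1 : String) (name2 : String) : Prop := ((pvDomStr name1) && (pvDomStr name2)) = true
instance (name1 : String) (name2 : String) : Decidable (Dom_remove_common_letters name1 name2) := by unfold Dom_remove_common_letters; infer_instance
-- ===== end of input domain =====

-- B sorts both names once and counts the common letters in a single merge pass instead of
-- A's repeated membership-test-and-remove scanning (objective: faster, O(n log n) vs O(n^2)).

-- ===== PORT A =====
-- the loop body: if char in name2_list: name1_list.remove(char); name2_list.remove(char)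
-- (name1_list.remove(char) can never raise here, see lemma pvA_loop_sum below; the
--  .getD fallback on the unreachable none case keeps the port total)
def pvAStep (st : List Char × List Char) (c : Char) : List Char × List Char :=
  if c ∈ st.2 then
    ((PySem.List.remove? st.1 c).getD st.1, (PySem.List.remove? st.2 c).getD st.2)
  else st

def remove_common_letters (name1 : String) (name2 : String) : Int :=
  let st := name1.toList.foldl pvAStep (name1.toList, name2.toList)
  ((st.1.length : Int) + (st.2.length : Int))

-- ===== PORT B =====
-- the while-loop of Source B: two pointers over the two sorted lists, counting matches
def pvMergeCount : List Char → List Char → Nat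
  | [], _ => 0
  | _ :: _, [] => 0
  | a :: s, b :: t =>
    if a = b then 1 + pvMergeCount s t
    else if a < b then pvMergeCount s (b :: t)
    else pvMergeCount (a :: s) t
termination_by s t => s.length + t.length

def remove_common_letters_alt (name1 : String) (name2 : String) : Int :=
  let s1 := PySem.List.sorted name1.toList (fun x => x) false
  let s2 := PySem.List.sorted name2.toList (fun x => x) false
  (name1.toList.length : Int) + (name2.toList.length : Int)
    - 2 * (pvMergeCount s1 s2 : Int)

-- ===== CLAIM (what is proved, stated in full; the proofs are below) =====
def Spec_remove_common_letters (name1 : String) (name2 : String) (out : Int) : Prop := out = remove_common_letters_alt name1 name2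
instance (name1 : String) (name2 : String) (out : Int) : Decidable (Spec_remove_common_letters name1 name2 out) := by unfold Spec_remove_common_letters; infer_instance

def Claim_equal_remove_common_letters : Prop := ∀ (name1 : String) (name2 : String), Dom_remove_common_letters name1 name2 → Spec_remove_common_letters name1 name2 (remove_common_letters name1 name2)

-- ===== LEMMAS AND PROOFS =====

-- merge count on sorted lists = card of the multiset intersection
theorem pvMergeCount_inter (s t : List Char) (hs : s.Pairwise (· ≤ ·)) (ht : t.Pairwise (· ≤ ·)) :
    pvMergeCount s t = ((s : Multiset Char) ∩ (t : Multiset Char)).card := by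
  revert hs ht
  fun_induction pvMergeCount s t with
  | case1 t => intro _ _; simp
  | case2 a s => intro _ _; simp
  | case3 s a t ih =>
    intro hs ht
    have hs' := (List.pairwise_cons.mp hs).2
    have ht' := (List.pairwise_cons.mp ht).2
    have hint : ((a :: s : List Char) : Multiset Char) ∩ ((a :: t : List Char) : Multiset Char)
        = a ::ₘ ((s : Multiset Char) ∩ (t : Multiset Char)) := by
      rw [show ((a :: s : List Char) : Multiset Char) = a ::ₘ (s : Multiset Char) from rfl,
          Multiset.cons_inter_of_pos _ (by simp)]
      simp
    rw [hint, Multiset.card_cons, ih hs' ht']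
    omega
  | case4 a s b t hne hlt ih =>
    intro hs ht
    have hs' := (List.pairwise_cons.mp hs).2
    have hnotmem : a ∉ (b :: t : List Char) := by
      intro hmem
      rcases List.mem_cons.mp hmem with h | h
      · exact absurd h hne
      · exact absurd ((List.pairwise_cons.mp ht).1 a h) (not_le.mpr hlt)
    have hint : ((a :: s : List Char) : Multiset Char) ∩ ((b :: t : List Char) : Multiset Char)
        = ((s : Multiset Char) ∩ ((b :: t : List Char) : Multiset Char)) := by
      rw [show ((a :: s : List Char) : Multiset Char) = a ::ₘ (s : Multiset Char) from rfl]
      exact Multiset.cons_inter_of_neg _ (by simpa using hnotmem)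
    rw [hint, ih hs' ht]
  | case5 a s b t hne hnlt ih =>
    intro hs ht
    have hbla : b < a := lt_of_le_of_ne (not_lt.mp hnlt) (fun h => hne h.symm)
    have ht' := (List.pairwise_cons.mp ht).2
    have hnotmem : b ∉ (a :: s : List Char) := by
      intro hmem
      rcases List.mem_cons.mp hmem with h | h
      · exact absurd h (ne_of_lt hbla)
      · exact absurd ((List.pairwise_cons.mp hs).1 b h) (not_le.mpr hbla)
    have hint : ((a :: s : List Char) : Multiset Char) ∩ ((b :: t : List Char) : Multiset Char)
        = ((a :: s : List Char) : Multiset Char) ∩ ((t : List Char) : Multiset Char) := by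
      rw [Multiset.inter_comm,
          show ((b :: t : List Char) : Multiset Char) = b ::ₘ (t : Multiset Char) from rfl,
          Multiset.cons_inter_of_neg _ (by simpa using hnotmem), Multiset.inter_comm]
    rw [hint, ih hs ht']

-- A's loop: as long as the remaining chars are covered by l1, the final length sum is
-- l1.length + l2.length - 2 * |cs ∩ l2|
theorem pvA_loop_sum (cs l1 l2 : List Char) (h : ∀ d, cs.count d ≤ l1.count d) :
    (((cs.foldl pvAStep (l1, l2)).1.length : Int) + ((cs.foldl pvAStep (l1, l2)).2.length : Int))
      = (l1.length : Int) + (l2.length : Int) - 2 * (((cs : Multiset Char) ∩ (l2 : Multiset Char)).card : Int) := by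
  induction cs generalizing l1 l2 with
  | nil => simp
  | cons c cs ih =>
    by_cases hc : c ∈ l2
    · have hcount : 0 < l1.count c := by
        have := h c
        simp [List.count_cons_self] at this
        omega
      have hc1 : c ∈ l1 := List.count_pos_iff.mp hcount
      have hstep : pvAStep (l1, l2) c = (l1.erase c, l2.erase c) := by
        simp [pvAStep, hc, PySem.List.remove?_eq_some_erase l1 c hc1, PySem.List.remove?_eq_some_erase l2 c hc]
      have h' : ∀ d, cs.count d ≤ (l1.erase c).count d := by
        intro d
        have hd := h d
        rw [List.count_cons] at hd
        rw [List.count_erase]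
        by_cases hdc : d = c <;> simp [hdc] at hd ⊢ <;> omega
      have hinter : (((c :: cs : List Char)) : Multiset Char) ∩ (l2 : Multiset Char)
          = c ::ₘ ((cs : Multiset Char) ∩ ((l2.erase c : List Char) : Multiset Char)) := by
        rw [show ((c :: cs : List Char) : Multiset Char) = c ::ₘ (cs : Multiset Char) from rfl,
            Multiset.cons_inter_of_pos _ (by simpa using hc)]
        simp
      have hl1 : (l1.erase c).length = l1.length - 1 := List.length_erase_of_mem hc1
      have hl2 : (l2.erase c).length = l2.length - 1 := List.length_erase_of_mem hc
      have hl1pos : 0 < l1.length := List.length_pos_of_mem hc1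
      have hl2pos : 0 < l2.length := List.length_pos_of_mem hc
      rw [List.foldl_cons, hstep, ih (l1.erase c) (l2.erase c) h', hinter,
          Multiset.card_cons, hl1, hl2]
      omega
    · have hstep : pvAStep (l1, l2) c = (l1, l2) := by simp [pvAStep, hc]
      have h' : ∀ d, cs.count d ≤ l1.count d := by
        intro d
        have hd := h d
        rw [List.count_cons] at hd
        omega
      have hinter : (((c :: cs : List Char)) : Multiset Char) ∩ (l2 : Multiset Char)
          = ((cs : Multiset Char) ∩ (l2 : Multiset Char)) := by
        rw [show ((c :: cs : List Char) : Multiset Char) = c ::ₘ (cs : Multiset Char) from rfl]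
        exact Multiset.cons_inter_of_neg _ (by simpa using hc)
      rw [List.foldl_cons, hstep, ih l1 l2 h', hinter]

-- ===== VERDICT (by name: the statement is the Claim_ definition above) =====
theorem remove_common_letters_spec : Claim_equal_remove_common_letters := by
  intro name1 name2 _
  unfold Spec_remove_common_letters remove_common_letters remove_common_letters_alt
  have hA := pvA_loop_sum name1.toList name1.toList name2.toList (fun d => le_refl _)
  have hB := pvMergeCount_inter (PySem.List.sorted name1.toList (fun x => x) false)
      (PySem.List.sorted name2.toList (fun x => x) false)
      (by simpa using PySem.List.sorted_pairwise name1.toList (fun x => x))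
      (by simpa using PySem.List.sorted_pairwise name2.toList (fun x => x))
  have h1 : ((PySem.List.sorted name1.toList (fun x => x) false : List Char) : Multiset Char) = (name1.toList : Multiset Char) :=
    Multiset.coe_eq_coe.mpr (PySem.List.sorted_perm _ _ _)
  have h2 : ((PySem.List.sorted name2.toList (fun x => x) false : List Char) : Multiset Char) = (name2.toList : Multiset Char) :=
    Multiset.coe_eq_coe.mpr (PySem.List.sorted_perm _ _ _)
  rw [hA]
  simp only [hB, h1, h2]
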